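-- pv_equiv track=rewrite | github.com/lifangnan/PKU-gym-notification | my_order.py | _reqListToDict
-- ===== SOURCE A (Python) =====
-- def _reqListToDict(reqList):
-- 	reqDict = {}
-- 	for req in reqList:
-- 		orderDate = req.split(" ")[0]
-- 		orderTime = req.split(" ")[1]
-- 		if orderDate in reqDict.keys():
-- 			reqDict[orderDate].append(orderTime)
-- 		else:
-- 			reqDict[orderDate] = [orderTime]
-- 	return reqDict
-- ===== SOURCE B (Python) =====
-- def _reqListToDict(reqList):
--     pairs = [(r.split(" ")[0], r.split(" ")[1]) for r in reqList]
--     return {d: [t for dd, t in pairs if dd == d]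
--             for d in dict.fromkeys(d for d, _ in pairs)}
-- ===== Notes on version B (the rewrite author's own statement) =====
-- stated objective: idiomatic
-- what changed: Replaces the incremental dict-mutation loop (membership test, append-or-create per row) by a two-phase comprehension: split all rows into (date,time) pairs once, dedup the dates with dict.fromkeys, then build each group with a filtering comprehension.
import Mathlib
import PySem

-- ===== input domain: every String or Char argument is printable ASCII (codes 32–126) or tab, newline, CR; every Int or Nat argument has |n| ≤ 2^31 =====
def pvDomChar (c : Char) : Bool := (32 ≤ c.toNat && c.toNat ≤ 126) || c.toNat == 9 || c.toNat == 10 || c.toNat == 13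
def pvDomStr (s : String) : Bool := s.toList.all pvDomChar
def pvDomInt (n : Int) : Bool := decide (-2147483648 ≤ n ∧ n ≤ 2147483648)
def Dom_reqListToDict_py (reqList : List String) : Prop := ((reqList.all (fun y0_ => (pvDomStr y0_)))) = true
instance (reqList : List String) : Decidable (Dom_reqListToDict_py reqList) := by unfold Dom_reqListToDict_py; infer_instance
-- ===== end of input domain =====

-- B groups via a two-phase decomposition (split all rows to pairs, dedup the dates, filter per date)
-- instead of A's incremental dict mutation; same result, no speed claim.

-- ===== PORT A =====
def reqListToDict_py (reqList : List String) : List (String × List String) :=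
  (reqList.foldl (fun reqDict req =>
      let orderDate := (PySem.List.pyGet? ((PySem.Str.split? req " ").getD []) 0).getD ""
      let orderTime := (PySem.List.pyGet? ((PySem.Str.split? req " ").getD []) 1).getD ""
      if reqDict.contains orderDate then
        reqDict.modify orderDate [] (· ++ [orderTime])
      else
        reqDict.insert orderDate [orderTime])
    (PySem.Dict.empty : PySem.Dict String (List String))).items

-- ===== PORT B =====
def reqListToDict_py_alt (reqList : List String) : List (String × List String) :=
  let pairs := reqList.map (fun r =>
    ((PySem.List.pyGet? ((PySem.Str.split? r " ").getD []) 0).getD "", (PySem.List.pyGet? ((PySem.Str.split? r " ").getD []) 1).getD ""))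
  (PySem.List.dedup (pairs.map (·.1))).map (fun d =>
    (d, (pairs.filter (fun p => p.1 == d)).map (·.2)))

-- ===== PRECONDITION & SPEC =====
-- Pre_ excludes exactly the rows with no space, on which A's req.split(" ")[1] raises IndexError.
def Pre_reqListToDict_py (reqList : List String) : Prop :=
  ∀ r ∈ reqList, ' ' ∈ r.toList
instance (reqList : List String) : Decidable (Pre_reqListToDict_py reqList) := by
  unfold Pre_reqListToDict_py; infer_instance
def pvWitness_reqListToDict_py : List String := ["2024-05-01 10:00", "2024-05-01 11:00", "2024-05-02 09:00"]

def Spec_reqListToDict_py (reqList : List String) (out : List (String × List String)) : Prop := out = reqListToDict_py_alt reqList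
instance (reqList : List String) (out : List (String × List String)) : Decidable (Spec_reqListToDict_py reqList out) := by unfold Spec_reqListToDict_py; infer_instance

-- ===== CLAIM (what is proved, stated in full; the proofs are below) =====
def Claim_equal_reqListToDict_py : Prop := ∀ (reqList : List String), Dom_reqListToDict_py reqList → Pre_reqListToDict_py reqList → Spec_reqListToDict_py reqList (reqListToDict_py reqList)

-- ===== LEMMAS AND PROOFS =====

-- one A-step (membership test, append-or-create) is exactly a modify with default []
theorem step_eq_modify (d : PySem.Dict String (List String)) (k : String) (t : String) :
    (if d.contains k then d.modify k [] (· ++ [t]) else d.insert k [t])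
      = d.modify k [] (· ++ [t]) := by
  by_cases h : d.contains k = true
  · simp [h]
  · have h' : d.contains k = false := by simpa using h
    simp [h', PySem.Dict.modify, PySem.Dict.getD_of_not_contains d ([] : List String) h']

theorem reqListToDict_py_spec : Claim_equal_reqListToDict_py := by
  intro reqList _ _
  unfold Spec_reqListToDict_py reqListToDict_py reqListToDict_py_alt
  simp only []
  -- A's loop body equals a single modify
  have hstep : (fun (d : PySem.Dict String (List String)) (req : String) =>
      let orderDate := (PySem.List.pyGet? ((PySem.Str.split? req " ").getD []) 0).getD ""
      let orderTime := (PySem.List.pyGet? ((PySem.Str.split? req " ").getD []) 1).getD ""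
      if d.contains orderDate then d.modify orderDate [] (· ++ [orderTime])
      else d.insert orderDate [orderTime])
    = (fun (d : PySem.Dict String (List String)) (req : String) =>
        d.modify ((PySem.List.pyGet? ((PySem.Str.split? req " ").getD []) 0).getD "")
          [] (· ++ [(PySem.List.pyGet? ((PySem.Str.split? req " ").getD []) 1).getD ""])) := by
    funext d req
    exact step_eq_modify d _ _
  rw [hstep]
  -- turn A's fold over reqList into a fold over the (date, time) pairs
  have hpairs := @List.foldl_map String (String × String)
      (PySem.Dict String (List String))
      (fun r => ((PySem.List.pyGet? ((PySem.Str.split? r " ").getD []) 0).getD "",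
                 (PySem.List.pyGet? ((PySem.Str.split? r " ").getD []) 1).getD ""))
      (fun d p => d.modify p.1 [] (· ++ [p.2])) reqList PySem.Dict.empty
  rw [← hpairs]
  set pairs := reqList.map (fun r =>
      ((PySem.List.pyGet? ((PySem.Str.split? r " ").getD []) 0).getD "",
       (PySem.List.pyGet? ((PySem.Str.split? r " ").getD []) 1).getD "")) with hp
  have hnd : (pairs.foldl (fun d p => d.modify p.1 [] (· ++ [p.2]))
      (PySem.Dict.empty : PySem.Dict String (List String))).keys.Nodup := by
    exact PySem.Dict.nodup_keys_foldl_modify_key pairs Prod.fst [] (fun _ p => (· ++ [p.2]))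
      PySem.Dict.empty (by simp [PySem.Dict.empty, PySem.Dict.keys])
  rw [PySem.Dict.items_eq_map_keys _ hnd []]
  have hkeys : (pairs.foldl (fun d p => d.modify p.1 [] (· ++ [p.2]))
      (PySem.Dict.empty : PySem.Dict String (List String))).keys
      = PySem.List.dedup (pairs.map (·.1)) := by
    rw [PySem.Dict.keys_foldl_modify_key pairs Prod.fst [] (fun _ p => (· ++ [p.2]))]
    rw [PySem.List.dedup_eq_ofList, PySem.Set.ofList_eq_foldl]
    rfl
  rw [hkeys]
  refine List.map_congr_left (fun k hk => ?_)
  rw [PySem.Dict.getD_foldl_modify_append pairs PySem.Dict.empty k,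
      PySem.Dict.getD_empty]
  simp
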